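-- pv_equiv track=rewrite | github.com/jonasrenault/cprex | cprex/ner/quantities.py | fix_grobid_qty_offset_for_special_chars
-- ===== SOURCE A (Python) =====
-- def fix_grobid_qty_offset_for_special_chars(
--     doc_text: str, start: int, end: int, raw: str
-- ) -> tuple[int, int]:
--     """
--     Grobid-quantities sometimes removes special characters, which
--     creates a discrepancy with spacy's doc. This function offsets
--     the start and end values of grobid-quantities to account for
--     missing special characters.
--     """
--     # offset by -1 start and end until we find the grobid-qty
--     # substring
--     s = start
--     e = end
--     while doc_text[s:e] != raw and s > 0:
--         s -= 1
--         e -= 1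
--
--     if doc_text[s:e] == raw:
--         return s, e
--     return start, end
-- ===== SOURCE B (Python) =====
-- def fix_grobid_qty_offset_for_special_chars(
--     doc_text: str, start: int, end: int, raw: str
-- ) -> tuple[int, int]:
--     """
--     Locate the rightmost occurrence of raw that ends at or before end with a
--     single rfind, instead of sliding the window left one character at a time.
--     """
--     if start <= 0 or end - start != len(raw) or not raw:
--         return start, end
--     p = doc_text.rfind(raw, 0, end)
--     if p != -1:
--         return p, p + len(raw)
--     return start, end
-- ===== Notes on version B (the rewrite author's own statement) =====
-- stated objective: faster
-- what changed: Replaces the per-character leftward window slide (one slice comparison per shift) with an early width guard plus a single rfind locating the rightmost occurrence of raw ending by end.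
-- intended difference: On windows whose width end-start differs from len(raw) (wider windows truncated at the end of the text, or end<start windows wrapping through a negative slice index), A's slice clamping can still compare equal to raw and A returns that shifted pair (a span sticking out past the text or with a negative end offset), while B returns (start, end) unchanged, the intended value since a window of the wrong width cannot genuinely contain raw. — e.g. on fix_grobid_qty_offset_for_special_chars("ab", 2, 5, "b"): A returns (1, 4), B returns (2, 5)
import Mathlib
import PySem

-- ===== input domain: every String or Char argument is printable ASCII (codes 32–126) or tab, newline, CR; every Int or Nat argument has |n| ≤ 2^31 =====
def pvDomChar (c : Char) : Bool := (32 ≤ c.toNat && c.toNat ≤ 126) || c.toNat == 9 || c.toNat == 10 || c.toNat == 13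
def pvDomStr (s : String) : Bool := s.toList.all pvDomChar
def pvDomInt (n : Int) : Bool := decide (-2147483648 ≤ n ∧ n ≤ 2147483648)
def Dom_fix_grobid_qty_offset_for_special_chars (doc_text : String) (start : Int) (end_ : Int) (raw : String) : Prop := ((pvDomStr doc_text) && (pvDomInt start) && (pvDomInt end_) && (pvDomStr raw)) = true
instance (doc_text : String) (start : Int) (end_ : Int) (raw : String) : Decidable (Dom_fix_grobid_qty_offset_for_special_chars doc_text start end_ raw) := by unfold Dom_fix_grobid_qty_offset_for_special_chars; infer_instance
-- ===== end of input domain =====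

-- B replaces A's one-step-at-a-time leftward window slide by a single rfind
-- locating the rightmost occurrence of raw ending by end_ (objective: faster);
-- on the D_ inputs below B intentionally leaves (start, end_) unchanged.

-- ===== PORT A =====
-- the while loop: while doc_text[s:e] != raw and s > 0: s -= 1; e -= 1
def pvLoopA (doc rawl : List Char) (s e : Int) : Int × Int :=
  if h : PySem.List.slice doc (some s) (some e) ≠ rawl ∧ 0 < s then
    pvLoopA doc rawl (s - 1) (e - 1)
  else (s, e)
termination_by s.toNat
decreasing_by omega

def fix_grobid_qty_offset_for_special_chars (doc_text : String) (start : Int) (end_ : Int) (raw : String) : Int × Int :=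
  let se := pvLoopA doc_text.toList raw.toList start end_
  if PySem.List.slice doc_text.toList (some se.1) (some se.2) = raw.toList then se
  else (start, end_)

-- ===== PORT B =====
def fix_grobid_qty_offset_for_special_chars_alt (doc_text : String) (start : Int) (end_ : Int) (raw : String) : Int × Int :=
  if start ≤ 0 ∨ end_ - start ≠ PySem.Str.len raw ∨ PySem.Str.len raw = 0 then (start, end_)
  else
    let p := PySem.Str.rfindFrom doc_text raw 0 (some end_)
    if p ≠ -1 then (p, p + PySem.Str.len raw) else (start, end_)

-- ===== PRECONDITION & SPEC =====
-- occurrence of rawl in doc at position s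
def pvOcc (doc rawl : List Char) (s : Nat) : Bool := rawl.isPrefixOf (doc.drop s)

-- On windows whose width end_-start differs from len(raw) (wider windows truncated at the
-- end of the text, or end_<start windows wrapping through a negative slice index), A's slice
-- clamping can still make doc_text[s:e] compare equal to raw and A returns that shifted pair
-- (a span sticking out past the text, or with a negative end offset), while B returns
-- (start, end_) unchanged — the intended value, since a window of the wrong width cannot
-- genuinely contain raw.
def D_fix_grobid_qty_offset_for_special_chars (doc_text : String) (start : Int) (end_ : Int) (raw : String) : Prop :=
  1 ≤ start ∧ 0 < raw.toList.length ∧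
    (((raw.toList.length : Int) < end_ - start ∧
        (raw.toList.length : Int) ≤ (doc_text.toList.length : Int) ∧
        (doc_text.toList.length : Int) - (raw.toList.length : Int) < start ∧
        PySem.Chars.endswith doc_text.toList raw.toList = true) ∨
     (end_ - start < 0 ∧
        (doc_text.toList.length : Int) + (end_ - start) = (raw.toList.length : Int) ∧
        (List.range ((min start (-(end_ - start) - 1)).toNat + 1)).any
          (pvOcc doc_text.toList raw.toList) = true ∧
        ¬(start ≤ -(end_ - start) - 1 ∧ pvOcc doc_text.toList raw.toList start.toNat = true)))
instance (doc_text : String) (start : Int) (end_ : Int) (raw : String) : Decidable (D_fix_grobid_qty_offset_for_special_chars doc_text start end_ raw) := by unfold D_fix_grobid_qty_offset_for_special_chars; infer_instance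

def Spec_fix_grobid_qty_offset_for_special_chars (doc_text : String) (start : Int) (end_ : Int) (raw : String) (out : Int × Int) : Prop := ¬ D_fix_grobid_qty_offset_for_special_chars doc_text start end_ raw → out = fix_grobid_qty_offset_for_special_chars_alt doc_text start end_ raw
instance (doc_text : String) (start : Int) (end_ : Int) (raw : String) (out : Int × Int) : Decidable (Spec_fix_grobid_qty_offset_for_special_chars doc_text start end_ raw out) := by unfold Spec_fix_grobid_qty_offset_for_special_chars; infer_instance

def pvDiffWitness_fix_grobid_qty_offset_for_special_chars : String × Int × Int × String := ("ab", 2, 5, "b")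
def pvDiffWitnessOut_fix_grobid_qty_offset_for_special_chars : (Int × Int) × (Int × Int) := ((1, 4), (2, 5))

-- ===== CLAIM (what is proved, stated in full; the proofs are below) =====
def Claim_unchanged_fix_grobid_qty_offset_for_special_chars : Prop := ∀ (doc_text : String) (start : Int) (end_ : Int) (raw : String), Dom_fix_grobid_qty_offset_for_special_chars doc_text start end_ raw → Spec_fix_grobid_qty_offset_for_special_chars doc_text start end_ raw (fix_grobid_qty_offset_for_special_chars doc_text start end_ raw)
def Claim_changed_fix_grobid_qty_offset_for_special_chars : Prop := Dom_fix_grobid_qty_offset_for_special_chars (pvDiffWitness_fix_grobid_qty_offset_for_special_chars.1) (pvDiffWitness_fix_grobid_qty_offset_for_special_chars.2.1) (pvDiffWitness_fix_grobid_qty_offset_for_special_chars.2.2.1) (pvDiffWitness_fix_grobid_qty_offset_for_special_chars.2.2.2) ∧ D_fix_grobid_qty_offset_for_special_chars (pvDiffWitness_fix_grobid_qty_offset_for_special_chars.1) (pvDiffWitness_fix_grobid_qty_offset_for_special_chars.2.1) (pvDiffWitness_fix_grobid_qty_offset_for_special_chars.2.2.1) (pvDiffWitness_fix_grobid_qty_offset_for_special_chars.2.2.2)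 ∧ fix_grobid_qty_offset_for_special_chars (pvDiffWitness_fix_grobid_qty_offset_for_special_chars.1) (pvDiffWitness_fix_grobid_qty_offset_for_special_chars.2.1) (pvDiffWitness_fix_grobid_qty_offset_for_special_chars.2.2.1) (pvDiffWitness_fix_grobid_qty_offset_for_special_chars.2.2.2) = pvDiffWitnessOut_fix_grobid_qty_offset_for_special_chars.1 ∧ fix_grobid_qty_offset_for_special_chars_alt (pvDiffWitness_fix_grobid_qty_offset_for_special_chars.1) (pvDiffWitness_fix_grobid_qty_offset_for_special_chars.2.1) (pvDiffWitness_fix_grobid_qty_offset_for_special_chars.2.2.1) (pvDiffWitness_fix_grobid_qty_offset_for_special_chars.2.2.2) = pvDiffWitnessOut_fix_grobid_qty_offset_for_special_chars.2 ∧ pvDiffWitnessOut_fix_grobid_qty_offset_for_special_chars.1 ≠ pvDiffWitnessOut_fix_grobid_qty_offset_for_special_chars.2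
def Claim_exact_fix_grobid_qty_offset_for_special_chars : Prop := ∀ (doc_text : String) (start : Int) (end_ : Int) (raw : String), Dom_fix_grobid_qty_offset_for_special_chars doc_text start end_ raw → D_fix_grobid_qty_offset_for_special_chars doc_text start end_ raw → fix_grobid_qty_offset_for_special_chars doc_text start end_ raw ≠ fix_grobid_qty_offset_for_special_chars_alt doc_text start end_ raw

-- ===== LEMMAS AND PROOFS =====

-- downward scan: greatest i ≤ k with P i, as an Option
def pvScan (P : Nat → Bool) : Nat → Option Nat
  | 0 => if P 0 then some 0 else none
  | (k+1) => if P (k+1) then some (k+1) else pvScan P k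

lemma pvScan_spec (P : Nat → Bool) (k : Nat) :
    (pvScan P k = none ∧ ∀ i ≤ k, P i = false) ∨
    (∃ p, pvScan P k = some p ∧ p ≤ k ∧ P p = true ∧ ∀ i, p < i → i ≤ k → P i = false) := by
  induction k with
  | zero =>
    cases h : P 0 with
    | true =>
      right
      exact ⟨0, by simp [pvScan, h], le_refl 0, h, fun i h1 h2 => absurd h2 (by omega)⟩
    | false =>
      left
      refine ⟨by simp [pvScan, h], ?_⟩
      intro i hi
      have : i = 0 := by omega
      rw [this]; exact h
  | succ j ih =>
    cases h : P (j+1) with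
    | true =>
      right
      exact ⟨j+1, by simp [pvScan, h], le_refl _, h, fun i h1 h2 => absurd h2 (by omega)⟩
    | false =>
      have hs : pvScan P (j+1) = pvScan P j := by simp [pvScan, h]
      rcases ih with ⟨h1, h2⟩ | ⟨p, hp, hpk, hPp, hmax⟩
      · left
        refine ⟨hs.trans h1, ?_⟩
        intro i hi
        rcases Nat.lt_or_ge i (j+1) with hlt | hge
        · exact h2 i (by omega)
        · have : i = j+1 := by omega
          rw [this]; exact h
      · right
        refine ⟨p, hs.trans hp, by omega, hPp, ?_⟩
        intro i hi1 hi2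
        rcases Nat.lt_or_ge i (j+1) with hlt | hge
        · exact hmax i hi1 (by omega)
        · have : i = j+1 := by omega
          rw [this]; exact h

lemma pvScan_none_of (P : Nat → Bool) (k : Nat) (h : ∀ i ≤ k, P i = false) :
    pvScan P k = none := by
  rcases pvScan_spec P k with ⟨h1, -⟩ | ⟨p, -, hpk, hPp, -⟩
  · exact h1
  · rw [h p hpk] at hPp; cases hPp

lemma pvScan_some_of (P : Nat → Bool) (k p : Nat) (hp : P p = true) (hpk : p ≤ k)
    (hmax : ∀ i, p < i → i ≤ k → P i = false) : pvScan P k = some p := by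
  rcases pvScan_spec P k with ⟨-, h2⟩ | ⟨q, hq, hqk, hQq, hqmax⟩
  · rw [h2 p hpk] at hp; cases hp
  · rcases Nat.lt_trichotomy p q with hlt | heq | hgt
    · rw [hmax q hlt hqk] at hQq; cases hQq
    · rw [hq, heq]
    · rw [hqmax p hgt hpk] at hp; cases hp

lemma pvScan_eq_of_iff (P Q : Nat → Bool) (k m : Nat)
    (h : ∀ i, (i ≤ k ∧ P i = true) ↔ (i ≤ m ∧ Q i = true)) : pvScan P k = pvScan Q m := by
  rcases pvScan_spec P k with ⟨h1, h2⟩ | ⟨p, hp, hpk, hPp, hmax⟩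
  · rw [h1]
    symm
    apply pvScan_none_of
    intro i hi
    by_contra hQ
    have hQ' : Q i = true := by
      cases hq : Q i
      · exact absurd hq hQ
      · rfl
    have := (h i).mpr ⟨hi, hQ'⟩
    rw [h2 i this.1] at this
    exact absurd this.2 (by simp)
  · rw [hp]
    symm
    apply pvScan_some_of
    · exact ((h p).mp ⟨hpk, hPp⟩).2
    · exact ((h p).mp ⟨hpk, hPp⟩).1
    · intro i hi1 hi2
      by_contra hQ
      have hQ' : Q i = true := by
        cases hq : Q i
        · exact absurd hq hQ
        · rfl
      have hPi := (h i).mpr ⟨hi2, hQ'⟩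
      rw [hmax i hi1 hPi.1] at hPi
      exact absurd hPi.2 (by simp)

-- the window predicate scanned by A's loop
def pvPA (doc rawl : List Char) (d : Int) (i : Nat) : Bool :=
  decide (PySem.List.slice doc (some (i : Int)) (some ((i : Int) + d)) = rawl)

lemma pvLoopA_eq (doc rawl : List Char) (d : Int) (k : Nat) :
    pvLoopA doc rawl (k : Int) ((k : Int) + d) =
      (match pvScan (pvPA doc rawl d) k with
        | some p => ((p : Int), (p : Int) + d)
        | none => (0, d)) := by
  induction k with
  | zero =>
    rw [pvLoopA]
    rw [dif_neg (by push_cast; simp)]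
    cases hP : pvPA doc rawl d 0 <;> simp [pvScan, hP]
  | succ j ih =>
    rw [pvLoopA]
    cases hm : pvPA doc rawl d (j+1) with
    | true =>
      have hsl : PySem.List.slice doc (some ((j+1 : Nat) : Int)) (some (((j+1 : Nat) : Int) + d)) = rawl := by
        simpa [pvPA] using hm
      rw [dif_neg (fun h => h.1 hsl)]
      simp [pvScan, hm]
    | false =>
      have hsl : PySem.List.slice doc (some ((j+1 : Nat) : Int)) (some (((j+1 : Nat) : Int) + d)) ≠ rawl := by
        simpa [pvPA] using hm
      rw [dif_pos ⟨hsl, by push_cast; omega⟩]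
      rw [(by push_cast; ring : ((j+1 : Nat) : Int) - 1 = ((j : Nat) : Int))]
      rw [(by push_cast; ring : ((j+1 : Nat) : Int) + d - 1 = ((j : Nat) : Int) + d)]
      rw [ih]
      simp [pvScan, hm]

lemma pvA_char (doc_text raw : String) (k : Nat) (d : Int) :
    fix_grobid_qty_offset_for_special_chars doc_text (k : Int) ((k : Int) + d) raw =
      (match pvScan (pvPA doc_text.toList raw.toList d) k with
        | some p => ((p : Int), (p : Int) + d)
        | none => ((k : Int), (k : Int) + d)) := by
  simp only [fix_grobid_qty_offset_for_special_chars, pvLoopA_eq]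
  cases hscan : pvScan (pvPA doc_text.toList raw.toList d) k with
  | some p =>
    simp only [hscan]
    rcases pvScan_spec (pvPA doc_text.toList raw.toList d) k with ⟨h1, -⟩ | ⟨q, hq, -, hPq, -⟩
    · rw [h1] at hscan; cases hscan
    · rw [hq] at hscan
      injection hscan with he
      subst he
      have hsl : PySem.List.slice doc_text.toList (some ((q : Nat) : Int)) (some (((q : Nat) : Int) + d)) = raw.toList := by
        simpa [pvPA] using hPq
      simp [hsl]
  | none =>
    simp only [hscan]
    rcases pvScan_spec (pvPA doc_text.toList raw.toList d) k with ⟨-, h2⟩ | ⟨q, hq, -, -, -⟩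
    · have hP0 : pvPA doc_text.toList raw.toList d 0 = false := h2 0 (Nat.zero_le k)
      have hsl : ¬ PySem.List.slice doc_text.toList (some ((0 : Nat) : Int)) (some (((0 : Nat) : Int) + d)) = raw.toList := by
        simpa [pvPA] using hP0
      have hsl' : ¬ PySem.List.slice doc_text.toList none (some d) = raw.toList := by
        simpa using hsl
      simp [hsl']
    · rw [hq] at hscan; cases hscan

lemma pvGo_eq (xs sub : List Char) (j : Nat) :
    PySem.Chars.rfind.go xs sub j =
      (match pvScan (fun i => sub.isPrefixOf (xs.drop i)) j with
        | some i => (i : Int)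
        | none => -1) := by
  induction j with
  | zero =>
    rw [PySem.Chars.rfind.go]
    cases h : sub.isPrefixOf (xs.drop 0) <;>
      simp only [List.drop_zero] at h <;> simp [pvScan, h, List.drop_zero]
  | succ i ih =>
    rw [PySem.Chars.rfind.go]
    cases h : sub.isPrefixOf (xs.drop (i+1)) <;> simp [pvScan, h, ih]

lemma pvRfind_aux (xs sub : List Char) :
    (if PySem.Chars.rfind xs sub = -1 then (-1 : Int) else 0 + PySem.Chars.rfind xs sub) =
      (match pvScan (fun i => sub.isPrefixOf (xs.drop i)) xs.length with
        | some i => (i : Int)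
        | none => -1) := by
  simp only [PySem.Chars.rfind, pvGo_eq]
  cases pvScan (fun i => sub.isPrefixOf (xs.drop i)) xs.length with
  | some i =>
    have hne : ((i : Nat) : Int) ≠ -1 := by omega
    simp [hne]
  | none => simp

lemma pvRfindFrom_char (s sub : List Char) (b : Int) (hb : 0 ≤ b) :
    PySem.Chars.rfindFrom s sub 0 (some b) =
      (match pvScan (fun i => sub.isPrefixOf ((s.take (min b.toNat s.length)).drop i))
          (min b.toNat s.length) with
        | some i => (i : Int)
        | none => -1) := by
  by_cases hnb : (s.length : Int) < b
  · have h1 : min b.toNat s.length = s.length := by omega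
    rw [h1]
    simp only [PySem.Chars.rfindFrom]
    rw [if_pos hnb]
    rw [if_neg (lt_irrefl (0 : Int))]
    rw [if_neg (by omega : ¬ ((s.length : Int) < 0))]
    simp only [Int.toNat_natCast, Int.toNat_zero, List.drop_zero]
    rw [pvRfind_aux (s.take s.length) sub]
    simp [List.length_take]
  · have h1 : min b.toNat s.length = b.toNat := by omega
    rw [h1]
    simp only [PySem.Chars.rfindFrom]
    rw [if_neg hnb, if_neg (not_lt.mpr hb)]
    rw [if_neg (lt_irrefl (0 : Int))]
    rw [if_neg (not_lt.mpr hb)]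
    simp only [Int.toNat_zero, List.drop_zero]
    rw [pvRfind_aux (s.take b.toNat) sub]
    simp [List.length_take, h1]

lemma pvClamp (n : Nat) (x : Int) :
    ((PySem.List.clampIdx n x : Nat) : Int) = if x < 0 then max ((n : Int) + x) 0 else min x (n : Int) := by
  simp only [PySem.List.clampIdx]
  split_ifs <;> omega

lemma pvTake_len_eq_iff (ys raw : List Char) : ys.take raw.length = raw ↔ raw <+: ys := by
  constructor
  · intro h
    rw [← h]
    exact List.take_prefix _ _
  · intro h
    exact (List.prefix_iff_eq_take.mp h).symm

lemma pvTake_big_eq_iff (ys raw : List Char) (D : Nat) (h : raw.length < D) :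
    ys.take D = raw ↔ ys = raw := by
  constructor
  · intro he
    have hl := congrArg List.length he
    simp only [List.length_take] at hl
    have hy : ys.take D = ys := List.take_of_length_le (by omega)
    rw [hy] at he
    exact he
  · intro he
    rw [he]
    exact List.take_of_length_le (by omega)

lemma pvSlice_nonneg (xs : List Char) (i : Nat) (d : Int) (hd : 0 ≤ (i : Int) + d) :
    PySem.List.slice xs (some (i : Int)) (some ((i : Int) + d)) =
      (xs.drop i).take (((i : Int) + d).toNat - i) := by
  rw [PySem.List.slice_toNat xs (Int.natCast_nonneg i) hd, Int.toNat_natCast]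

lemma pvSlice_neg (xs : List Char) (i w : Nat) (d : Int) (hneg : (i : Int) + d < 0)
    (hw : (xs.length : Int) + d = (w : Int)) (hi : i ≤ xs.length) :
    PySem.List.slice xs (some (i : Int)) (some ((i : Int) + d)) = (xs.drop i).take w := by
  have ha : PySem.List.clampIdx xs.length ((i : Int)) = i := by
    simp only [PySem.List.clampIdx]
    split_ifs <;> omega
  have hb : PySem.List.clampIdx xs.length ((i : Int) + d) = i + w := by
    simp only [PySem.List.clampIdx]
    split_ifs <;> omega
  simp only [PySem.List.slice, ha, hb]
  congr 1
  omega

lemma pvPA_eqL (doc rawl : List Char) (i : Nat) :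
    pvPA doc rawl ((rawl.length : Int)) i = true ↔ rawl <+: doc.drop i := by
  simp only [pvPA, decide_eq_true_eq]
  rw [pvSlice_nonneg doc i _ (by omega)]
  have ht : (((i : Int) + (rawl.length : Int))).toNat - i = rawl.length := by omega
  rw [ht]
  exact pvTake_len_eq_iff _ _

lemma pvPA_gt (doc rawl : List Char) (d : Int) (i : Nat) (hgt : (rawl.length : Int) < d) :
    pvPA doc rawl d i = true ↔ doc.drop i = rawl := by
  simp only [pvPA, decide_eq_true_eq]
  rw [pvSlice_nonneg doc i d (by omega)]
  exact pvTake_big_eq_iff _ _ _ (by omega)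

lemma pvLen_ne (doc rawl : List Char) (d : Int) (i : Nat) (h1 : d < (rawl.length : Int))
    (h2 : 0 ≤ (i : Int) + d ∨ d + (doc.length : Int) ≠ (rawl.length : Int))
    (hnil : rawl ≠ []) : pvPA doc rawl d i = false := by
  have hL1 : 0 < rawl.length := Nat.pos_of_ne_zero (fun h => hnil (List.eq_nil_of_length_eq_zero h))
  simp only [pvPA, decide_eq_false_iff_not]
  intro he
  have hlen := congrArg List.length he
  rw [PySem.List.length_slice] at hlen
  have c1 := pvClamp doc.length ((i : Int) + d)
  have c2 := pvClamp doc.length ((i : Int))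
  split_ifs at c1 c2 <;> omega

lemma pvPA_negL (doc rawl : List Char) (d : Int) (i : Nat) (hnil : rawl ≠ [])
    (hw : d + (doc.length : Int) = (rawl.length : Int)) (hdL : d < (rawl.length : Int)) :
    pvPA doc rawl d i = true ↔ ((i : Int) + d < 0 ∧ rawl.isPrefixOf (doc.drop i) = true) := by
  have hL1 : 0 < rawl.length := Nat.pos_of_ne_zero (fun h => hnil (List.eq_nil_of_length_eq_zero h))
  by_cases hneg : (i : Int) + d < 0
  · have hi : i ≤ doc.length := by omega
    simp only [pvPA, decide_eq_true_eq]
    rw [pvSlice_neg doc i rawl.length d hneg (by omega) hi]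
    rw [pvTake_len_eq_iff, List.isPrefixOf_iff_prefix]
    simp [hneg]
  · have hF := pvLen_ne doc rawl d i hdL (Or.inl (by omega)) hnil
    simp [hF, hneg]

lemma pvPA_L0_top (doc : List Char) (d : Int) (k : Nat) (h : pvPA doc [] d k = false) :
    ∀ i ≤ k, pvPA doc [] d i = false := by
  intro i hi
  rw [Bool.eq_false_iff]
  intro hPi
  simp only [pvPA, decide_eq_true_eq] at hPi
  simp only [pvPA, decide_eq_false_iff_not] at h
  apply h
  have hi0 : (PySem.List.slice doc (some (i : Int)) (some ((i : Int) + d))).length = 0 := by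
    rw [hPi]; rfl
  rw [PySem.List.length_slice] at hi0
  have c1 := pvClamp doc.length ((i : Int) + d)
  have c2 := pvClamp doc.length ((i : Int))
  have c3 := pvClamp doc.length ((k : Int) + d)
  have c4 := pvClamp doc.length ((k : Int))
  have hk0 : (PySem.List.slice doc (some (k : Int)) (some ((k : Int) + d))).length = 0 := by
    rw [PySem.List.length_slice]
    split_ifs at c1 c2 c3 c4 <;> omega
  exact List.eq_nil_of_length_eq_zero hk0

lemma pvScanA_L0 (doc : List Char) (d : Int) (k : Nat) :
    (match pvScan (pvPA doc [] d) k with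
      | some p => ((p : Int), (p : Int) + d)
      | none => ((k : Int), (k : Int) + d)) = ((k : Int), (k : Int) + d) := by
  cases hk : pvPA doc [] d k with
  | true =>
    rw [pvScan_some_of _ k k hk (le_refl k) (fun i h1 h2 => absurd h2 (by omega))]
  | false =>
    rw [pvScan_none_of _ k (pvPA_L0_top doc d k hk)]

lemma pvScanEq_dL (doc rawl : List Char) (k : Nat) (hnil : rawl ≠ []) :
    pvScan (pvPA doc rawl ((rawl.length : Int))) k =
      pvScan (fun i => rawl.isPrefixOf ((doc.take (min (k + rawl.length) doc.length)).drop i))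
        (min (k + rawl.length) doc.length) := by
  have hL1 : 0 < rawl.length := Nat.pos_of_ne_zero (fun h => hnil (List.eq_nil_of_length_eq_zero h))
  apply pvScan_eq_of_iff
  intro i
  constructor
  · rintro ⟨hik, hP⟩
    have hpre : rawl <+: doc.drop i := (pvPA_eqL doc rawl i).mp hP
    have hilen : rawl.length ≤ (doc.drop i).length := hpre.length_le
    rw [List.length_drop] at hilen
    refine ⟨by omega, ?_⟩
    rw [List.isPrefixOf_iff_prefix, List.drop_take, List.prefix_take_iff]
    exact ⟨hpre, by omega⟩
  · rintro ⟨hiE, hQ⟩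
    rw [List.isPrefixOf_iff_prefix, List.drop_take, List.prefix_take_iff] at hQ
    obtain ⟨hpre, hlen⟩ := hQ
    refine ⟨by omega, (pvPA_eqL doc rawl i).mpr hpre⟩

lemma pvScanA_gt_some (doc rawl : List Char) (k : Nat) (d : Int) (hnil : rawl ≠ [])
    (hgt : (rawl.length : Int) < d) (h1 : rawl.length ≤ doc.length)
    (h2 : doc.length - rawl.length ≤ k) (h3 : rawl <:+ doc) :
    pvScan (pvPA doc rawl d) k = some (doc.length - rawl.length) := by
  have hL1 : 0 < rawl.length := Nat.pos_of_ne_zero (fun h => hnil (List.eq_nil_of_length_eq_zero h))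
  apply pvScan_some_of
  · rw [pvPA_gt _ _ _ _ hgt]
    exact (List.suffix_iff_eq_drop.mp h3).symm
  · exact h2
  · intro i hi1 hi2
    rw [Bool.eq_false_iff]
    intro hP
    have hdrop := (pvPA_gt _ _ _ _ hgt).mp hP
    have hlen := congrArg List.length hdrop
    rw [List.length_drop] at hlen
    omega

lemma pvScanA_gt_none (doc rawl : List Char) (k : Nat) (d : Int) (hnil : rawl ≠ [])
    (hgt : (rawl.length : Int) < d)
    (hnot : ¬ (rawl.length ≤ doc.length ∧ doc.length - rawl.length ≤ k ∧ rawl <:+ doc)) :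
    pvScan (pvPA doc rawl d) k = none := by
  have hL1 : 0 < rawl.length := Nat.pos_of_ne_zero (fun h => hnil (List.eq_nil_of_length_eq_zero h))
  apply pvScan_none_of
  intro i hi
  rw [Bool.eq_false_iff]
  intro hP
  have hdrop := (pvPA_gt _ _ _ _ hgt).mp hP
  have hlen := congrArg List.length hdrop
  rw [List.length_drop] at hlen
  apply hnot
  refine ⟨by omega, by omega, ?_⟩
  rw [← hdrop]
  exact List.drop_suffix _ _

-- A = B for positive start outside D_
lemma pvMainPos (doc_text raw : String) (k : Nat) (d : Int) (hk : 0 < k)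
    (hnD : ¬ D_fix_grobid_qty_offset_for_special_chars doc_text (k : Int) ((k : Int) + d) raw) :
    fix_grobid_qty_offset_for_special_chars doc_text (k : Int) ((k : Int) + d) raw =
      fix_grobid_qty_offset_for_special_chars_alt doc_text (k : Int) ((k : Int) + d) raw := by
  rw [pvA_char]
  simp only [fix_grobid_qty_offset_for_special_chars_alt, PySem.Str.len_eq,
    PySem.Str.rfindFrom_eq, add_sub_cancel_left]
  simp only [D_fix_grobid_qty_offset_for_special_chars, add_sub_cancel_left] at hnD
  by_cases hL0 : raw.toList.length = 0
  · rw [if_pos (Or.inr (Or.inr (by exact_mod_cast hL0)))]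
    rw [List.eq_nil_of_length_eq_zero hL0]
    exact pvScanA_L0 doc_text.toList d k
  · have hnil : raw.toList ≠ [] := fun h => hL0 (by rw [h]; rfl)
    have hLpos : 0 < raw.toList.length := Nat.pos_of_ne_zero hL0
    push_neg at hnD
    obtain ⟨hnC, hnE⟩ := hnD (by omega) hLpos
    by_cases hd : d = (raw.toList.length : Int)
    · rw [if_neg (by push_neg; exact ⟨by omega, hd, by omega⟩)]
      subst hd
      rw [pvRfindFrom_char doc_text.toList raw.toList ((k : Int) + (raw.toList.length : Int)) (by omega)]
      have ht : (((k : Int) + (raw.toList.length : Int))).toNat = k + raw.toList.length := by omega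
      rw [ht]
      rw [pvScanEq_dL doc_text.toList raw.toList k hnil]
      cases hs : pvScan
          (fun i => raw.toList.isPrefixOf
            ((doc_text.toList.take (min (k + raw.toList.length) doc_text.toList.length)).drop i))
          (min (k + raw.toList.length) doc_text.toList.length) with
      | some p =>
        simp only [hs]
        rw [if_pos (by omega : ((p : Int)) ≠ -1)]
      | none =>
        simp only [hs]
        rw [if_neg (by simp : ¬ ((-1 : Int) ≠ -1))]
    · rw [if_pos (Or.inr (Or.inl hd))]
      by_cases hgt : (raw.toList.length : Int) < d
      · by_cases hc : raw.toList.length ≤ doc_text.toList.length ∧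
            doc_text.toList.length - raw.toList.length ≤ k ∧ raw.toList <:+ doc_text.toList
        · obtain ⟨c1, c2, c3⟩ := hc
          have hnCk : ¬ ((doc_text.toList.length : Int) - (raw.toList.length : Int) < (k : Int)) := by
            intro hlt
            exact absurd ((PySem.Chars.endswith_iff _ _).mpr c3)
              (by simpa using hnC hgt (by omega) hlt)
          have heqk : doc_text.toList.length - raw.toList.length = k := by omega
          rw [pvScanA_gt_some doc_text.toList raw.toList k d hnil hgt c1 c2 c3, heqk]
        · rw [pvScanA_gt_none doc_text.toList raw.toList k d hnil hgt hc]
      · have hlt : d < (raw.toList.length : Int) := by omega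
        by_cases hw : (doc_text.toList.length : Int) + d = (raw.toList.length : Int)
        · by_cases hdneg : d < 0
          · by_cases hany : (List.range ((min ((k : Int)) (-d - 1)).toNat + 1)).any
                (pvOcc doc_text.toList raw.toList) = true
            · have hkend := hnE hdneg hw hany
              have hPk : pvPA doc_text.toList raw.toList d k = true := by
                rw [pvPA_negL doc_text.toList raw.toList d k hnil (by omega) hlt]
                refine ⟨by omega, ?_⟩
                have := hkend.2
                simpa [pvOcc, Int.toNat_natCast] using this
              rw [pvScan_some_of _ k k hPk (le_refl k) (fun i h1 h2 => absurd h2 (by omega))]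
            · rw [pvScan_none_of _ k ?_]
              intro i hi
              rw [Bool.eq_false_iff]
              intro hP
              obtain ⟨hneg, hocc⟩ :=
                (pvPA_negL doc_text.toList raw.toList d i hnil (by omega) hlt).mp hP
              apply hany
              rw [List.any_eq_true]
              refine ⟨i, ?_, hocc⟩
              rw [List.mem_range]
              omega
          · rw [pvScan_none_of _ k (fun i hi =>
              pvLen_ne doc_text.toList raw.toList d i hlt (Or.inl (by omega)) hnil)]
        · rw [pvScan_none_of _ k (fun i hi =>
            pvLen_ne doc_text.toList raw.toList d i hlt (Or.inr (by omega)) hnil)]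

-- A ≠ B for every input inside D_
lemma pvExactPos (doc_text raw : String) (k : Nat) (d : Int) (hk : 0 < k)
    (hD : D_fix_grobid_qty_offset_for_special_chars doc_text (k : Int) ((k : Int) + d) raw) :
    fix_grobid_qty_offset_for_special_chars doc_text (k : Int) ((k : Int) + d) raw ≠
      fix_grobid_qty_offset_for_special_chars_alt doc_text (k : Int) ((k : Int) + d) raw := by
  simp only [D_fix_grobid_qty_offset_for_special_chars, add_sub_cancel_left] at hD
  obtain ⟨-, hLpos, hbr⟩ := hD
  have hnil : raw.toList ≠ [] :=
    fun h => absurd hLpos (by rw [h]; simp)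
  have hdne : d ≠ (raw.toList.length : Int) := by
    rcases hbr with ⟨h1, -⟩ | ⟨h1, -⟩ <;> omega
  have halt : fix_grobid_qty_offset_for_special_chars_alt doc_text (k : Int) ((k : Int) + d) raw
      = ((k : Int), (k : Int) + d) := by
    simp only [fix_grobid_qty_offset_for_special_chars_alt, PySem.Str.len_eq, add_sub_cancel_left]
    rw [if_pos (Or.inr (Or.inl hdne))]
  rw [halt, pvA_char]
  rcases hbr with ⟨hgt, hLn, hnLk, hsuf⟩ | ⟨hdneg, hw, hany, hnot⟩
  · have h3 : raw.toList <:+ doc_text.toList := (PySem.Chars.endswith_iff _ _).mp hsuf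
    rw [pvScanA_gt_some doc_text.toList raw.toList k d hnil hgt (by omega) (by omega) h3]
    intro hcon
    have := congrArg Prod.fst hcon
    simp only at this
    omega
  · have hlt : d < (raw.toList.length : Int) := by omega
    rcases pvScan_spec (pvPA doc_text.toList raw.toList d) k with ⟨hnone, hall⟩ | ⟨p, hp, hpk, hPp, -⟩
    · exfalso
      rw [List.any_eq_true] at hany
      obtain ⟨s, hsmem, hsocc⟩ := hany
      rw [List.mem_range] at hsmem
      have hPs : pvPA doc_text.toList raw.toList d s = true := by
        rw [pvPA_negL doc_text.toList raw.toList d s hnil (by omega) hlt]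
        exact ⟨by omega, hsocc⟩
      rw [hall s (by omega)] at hPs
      cases hPs
    · rw [hp]
      obtain ⟨hneg, hocc⟩ := (pvPA_negL doc_text.toList raw.toList d p hnil (by omega) hlt).mp hPp
      have hpne : p ≠ k := by
        intro he
        subst he
        exact hnot ⟨by omega, by simpa [pvOcc, Int.toNat_natCast] using hocc⟩
      intro hcon
      have := congrArg Prod.fst hcon
      simp only at this
      omega

lemma pvMain (doc_text : String) (start end_ : Int) (raw : String)
    (hnD : ¬ D_fix_grobid_qty_offset_for_special_chars doc_text start end_ raw) :
    fix_grobid_qty_offset_for_special_chars doc_text start end_ raw =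
      fix_grobid_qty_offset_for_special_chars_alt doc_text start end_ raw := by
  by_cases hs : start ≤ 0
  · have hA : fix_grobid_qty_offset_for_special_chars doc_text start end_ raw = (start, end_) := by
      simp only [fix_grobid_qty_offset_for_special_chars]
      rw [pvLoopA]
      rw [dif_neg (fun h => absurd h.2 (by omega))]
      split_ifs <;> rfl
    have hB : fix_grobid_qty_offset_for_special_chars_alt doc_text start end_ raw = (start, end_) := by
      simp only [fix_grobid_qty_offset_for_special_chars_alt]
      rw [if_pos (Or.inl hs)]
    rw [hA, hB]
  · obtain ⟨k, rfl⟩ : ∃ k : Nat, start = (k : Int) :=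
      ⟨start.toNat, by omega⟩
    have he : end_ = (k : Int) + (end_ - (k : Int)) := by ring
    rw [he]
    rw [he] at hnD
    exact pvMainPos doc_text raw k (end_ - (k : Int)) (by omega) hnD

-- ===== VERDICT (by name: the statements are the Claim_ definitions above) =====
theorem fix_grobid_qty_offset_for_special_chars_spec : Claim_unchanged_fix_grobid_qty_offset_for_special_chars := by
  intro doc_text start end_ raw _ hnD
  exact pvMain doc_text start end_ raw hnD

theorem fix_grobid_qty_offset_for_special_chars_changed : Claim_changed_fix_grobid_qty_offset_for_special_chars := by
  unfold Claim_changed_fix_grobid_qty_offset_for_special_chars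
  have hL : pvLoopA "ab".toList "b".toList 2 5 = (1, 4) := by
    rw [pvLoopA, dif_pos (by decide), pvLoopA, dif_neg (by decide)]
    decide
  refine ⟨by decide, by decide, ?_, by decide, by decide⟩
  show fix_grobid_qty_offset_for_special_chars "ab" 2 5 "b" = ((1 : Int), (4 : Int))
  unfold fix_grobid_qty_offset_for_special_chars
  rw [hL]
  decide

theorem fix_grobid_qty_offset_for_special_chars_tight : Claim_exact_fix_grobid_qty_offset_for_special_chars := by
  intro doc_text start end_ raw _ hD
  have hs : 1 ≤ start := hD.1
  obtain ⟨k, rfl⟩ : ∃ k : Nat, start = (k : Int) := ⟨start.toNat, by omega⟩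
  have he : end_ = (k : Int) + (end_ - (k : Int)) := by ring
  rw [he]
  rw [he] at hD
  exact pvExactPos doc_text raw k (end_ - (k : Int)) (by omega) hD
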